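-- pv_equiv track=rewrite | github.com/pxlc/pxlc_td_toolbox | apps/launcher/bin/post_process_converted_ui_file.py | replace_for_QtWidgets
-- ===== SOURCE A (Python) =====
-- def replace_for_QtWidgets( line ):
--
--     bits = line.split('QtGui.')
--
--     out_line_arr = [ bits[0] ]
--     bits = bits[1:]
--
--     for b in bits:
--         if b.startswith('QIcon') or b.startswith('QPixmap'):
--             out_line_arr += ['QtGui.', b]
--         else:
--             out_line_arr += ['QtWidgets.', b]
--
--     return ''.join( out_line_arr )
-- ===== SOURCE B (Python) =====
-- def replace_for_QtWidgets(line):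
--     # Single left-to-right scan: replace 'QtGui.' by 'QtWidgets.' unless the
--     # text right after it starts with 'QIcon' or 'QPixmap'.
--     out = []
--     i = 0
--     n = len(line)
--     while i < n:
--         if line.startswith('QtGui.', i) and not (
--             line.startswith('QIcon', i + 6) or line.startswith('QPixmap', i + 6)
--         ):
--             out.append('QtWidgets.')
--             i += 6
--         else:
--             out.append(line[i])
--             i += 1
--     return ''.join(out)
-- ===== Notes on version B (the rewrite author's own statement) =====
-- stated objective: alternative
-- what changed: Replaces A's split-on-separator / rebuild-piece-list / join pipeline with a single left-to-right character scan that copies characters and substitutes the replacement in place unless the occurrence is followed by an icon/pixmap class name; same asymptotic cost, no intermediate piece lists.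
import Mathlib
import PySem

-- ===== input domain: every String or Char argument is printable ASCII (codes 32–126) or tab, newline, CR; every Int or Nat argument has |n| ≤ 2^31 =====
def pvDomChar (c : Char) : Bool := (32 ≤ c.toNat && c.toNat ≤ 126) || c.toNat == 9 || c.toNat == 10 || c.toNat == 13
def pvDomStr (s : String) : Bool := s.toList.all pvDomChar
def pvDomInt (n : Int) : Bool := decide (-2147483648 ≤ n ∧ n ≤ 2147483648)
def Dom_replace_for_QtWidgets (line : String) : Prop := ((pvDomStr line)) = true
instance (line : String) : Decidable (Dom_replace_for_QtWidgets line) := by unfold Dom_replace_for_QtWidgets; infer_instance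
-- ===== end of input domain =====

-- B replaces A's split-on-'QtGui.'/rebuild/join pipeline with a single left-to-right
-- character scan (alternative algorithm; same asymptotic cost).

-- ===== PORT A =====
def replace_for_QtWidgets (line : String) : String :=
  match PySem.Str.split? line "QtGui." with
  | none => ""  -- unreachable: the separator "QtGui." is nonempty
  | some bits =>
      -- out_line_arr = [ bits[0] ]  (split never returns an empty list, so the default is unreachable)
      let out0 : List String := [bits.headD ""]
      -- bits = bits[1:]
      let rest : List String := PySem.List.slice bits (some 1) none
      -- the for-loop: out_line_arr += ['QtGui.', b] / ['QtWidgets.', b]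
      let out : List String := rest.foldl (fun acc b =>
        acc ++ (if PySem.Str.startswith b "QIcon" || PySem.Str.startswith b "QPixmap"
                then ["QtGui.", b] else ["QtWidgets.", b])) out0
      PySem.Str.join "" out

-- ===== PORT B =====
-- helpers: the literal strings of Source B as character lists
def pvSep : List Char := ['Q', 't', 'G', 'u', 'i', '.']
def pvWid : List Char := ['Q', 't', 'W', 'i', 'd', 'g', 'e', 't', 's', '.']
def pvIco : List Char := ['Q', 'I', 'c', 'o', 'n']
def pvPix : List Char := ['Q', 'P', 'i', 'x', 'm', 'a', 'p']

-- the while-loop of Source B: one left-to-right scan; 'line.startswith(p, i)' is a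
-- prefix test on the remaining suffix, 'i += 6' is dropping the matched 'QtGui.'
def pvScan : List Char → List Char
  | [] => []
  | c :: cs =>
      if pvSep.isPrefixOf (c :: cs)
          && !(pvIco.isPrefixOf (cs.drop 5) || pvPix.isPrefixOf (cs.drop 5))
      then pvWid ++ pvScan (cs.drop 5)
      else c :: pvScan cs
  termination_by l => l.length
  decreasing_by
  · simp only [List.length_cons, List.length_drop]; omega
  · simp

def replace_for_QtWidgets_alt (line : String) : String :=
  String.ofList (pvScan line.toList)

-- ===== PRECONDITION & SPEC =====
def Spec_replace_for_QtWidgets (line : String) (out : String) : Prop := out = replace_for_QtWidgets_alt line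
instance (line : String) (out : String) : Decidable (Spec_replace_for_QtWidgets line out) := by unfold Spec_replace_for_QtWidgets; infer_instance

-- ===== CLAIM (what is proved, stated in full; the proofs are below) =====
def Claim_equal_replace_for_QtWidgets : Prop := ∀ (line : String), Dom_replace_for_QtWidgets line → Spec_replace_for_QtWidgets line (replace_for_QtWidgets line)

-- ===== LEMMAS AND PROOFS =====

-- proof-side recursive characterisation of str.split('QtGui.'):
-- first piece (before the first separator) and the list of later pieces
def pvSplit : List Char → List Char × List (List Char)
  | [] => ([], [])
  | c :: cs =>
      if pvSep.isPrefixOf (c :: cs)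
      then ([], (pvSplit (cs.drop 5)).1 :: (pvSplit (cs.drop 5)).2)
      else (c :: (pvSplit cs).1, (pvSplit cs).2)
  termination_by l => l.length
  decreasing_by
  · simp only [List.length_cons, List.length_drop]; omega
  · simp

-- what A's loop+join produces from the later pieces
def pvTailJoin (ps : List (List Char)) : List Char :=
  ps.flatMap (fun b => (if pvIco.isPrefixOf b || pvPix.isPrefixOf b then pvSep else pvWid) ++ b)

theorem pvSplitOn_go_spec (fuel : Nat) :
    ∀ (l cur : List Char) (accs : List (List Char)), l.length < fuel →
      PySem.Chars.splitOn.go pvSep fuel l cur accs =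
        accs.reverse ++ (cur.reverse ++ (pvSplit l).1) :: (pvSplit l).2 := by
  induction fuel with
  | zero => intro l cur accs h; omega
  | succ fuel ih =>
    intro l cur accs h
    match l with
    | [] => simp [PySem.Chars.splitOn.go, pvSplit]
    | c :: cs =>
      rw [PySem.Chars.splitOn.go]
      by_cases hp : pvSep.isPrefixOf (c :: cs)
      · rw [if_pos hp]
        have hd : List.drop pvSep.length (c :: cs) = cs.drop 5 := by
          simp [pvSep]
        rw [hd, ih _ _ _ (by simp at h ⊢; omega)]
        rw [pvSplit, if_pos hp]
        simp
      · rw [if_neg hp, ih _ _ _ (by simp at h ⊢; omega)]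
        rw [pvSplit, if_neg hp]
        simp

theorem pvSplitOn_eq (l : List Char) :
    PySem.Chars.splitOn l pvSep = (pvSplit l).1 :: (pvSplit l).2 := by
  rw [PySem.Chars.splitOn, pvSplitOn_go_spec (l.length + 1) l [] [] (by omega)]
  simp

theorem pvSplit_first_prefix (l : List Char) : (pvSplit l).1 <+: l := by
  fun_induction pvSplit l with
  | case1 => simp
  | case2 c cs hp ih => simp
  | case3 c cs hp ih => simpa using ih

theorem pvSplit_first_take (l : List Char) (k : Nat)
    (h : ∀ j < k, ¬ pvSep <+: l.drop j) : (pvSplit l).1.take k = l.take k := by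
  induction l using pvSplit.induct generalizing k with
  | case1 => simp [pvSplit]
  | case2 c cs hp ih =>
    cases k with
    | zero => simp
    | succ k =>
      exact absurd (List.isPrefixOf_iff_prefix.mp hp) (by simpa using h 0 (by omega))
  | case3 c cs hp ih =>
    cases k with
    | zero => simp
    | succ k =>
      rw [pvSplit, if_neg hp]
      simp only [List.take_succ_cons]
      rw [ih k (fun j hj => by simpa using h (j + 1) (by omega))]

theorem pvNoSep_ico (l : List Char) (h : pvIco <+: l) : ∀ j < 5, ¬ pvSep <+: l.drop j := by
  obtain ⟨t, rfl⟩ := h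
  intro j hj hsep
  interval_cases j <;> simp [pvIco, pvSep, List.cons_prefix_cons] at hsep

theorem pvNoSep_pix (l : List Char) (h : pvPix <+: l) : ∀ j < 7, ¬ pvSep <+: l.drop j := by
  obtain ⟨t, rfl⟩ := h
  intro j hj hsep
  interval_cases j <;> simp [pvPix, pvSep, List.cons_prefix_cons] at hsep

theorem pvScan_skip (rest : List Char)
    (h : pvIco.isPrefixOf rest || pvPix.isPrefixOf rest) :
    pvScan (pvSep ++ rest) = pvSep ++ pvScan rest := by
  rw [show pvSep ++ rest = 'Q'::'t'::'G'::'u'::'i'::'.'::rest from by simp [pvSep]]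
  rw [pvScan, if_neg (by simp [pvSep, List.isPrefixOf, h])]
  rw [pvScan, if_neg (by simp [pvSep, List.isPrefixOf])]
  rw [pvScan, if_neg (by simp [pvSep, List.isPrefixOf])]
  rw [pvScan, if_neg (by simp [pvSep, List.isPrefixOf])]
  rw [pvScan, if_neg (by simp [pvSep, List.isPrefixOf])]
  rw [pvScan, if_neg (by simp [pvSep, List.isPrefixOf])]
  simp [pvSep]

theorem pvMain (l : List Char) :
    pvScan l = (pvSplit l).1 ++ pvTailJoin (pvSplit l).2 := by
  fun_induction pvSplit l with
  | case1 => simp [pvScan, pvTailJoin]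
  | case2 c cs hp ih =>
    simp only []
    by_cases hla : (pvIco.isPrefixOf (cs.drop 5) || pvPix.isPrefixOf (cs.drop 5)) = true
    · -- 'QtGui.' kept: followed by QIcon / QPixmap
      obtain ⟨t, ht⟩ := List.isPrefixOf_iff_prefix.mp hp
      have ht' := ht
      rw [pvSep] at ht'
      simp only [List.cons_append, List.nil_append, List.cons.injEq] at ht'
      have hts : cs.drop 5 = t := by rw [← ht'.2]; rfl
      have hskip : pvScan (c :: cs) = pvSep ++ pvScan (cs.drop 5) := by
        rw [show c :: cs = pvSep ++ cs.drop 5 from by rw [hts]; exact ht.symm]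
        exact pvScan_skip _ hla
      have hfirst : (pvIco.isPrefixOf (pvSplit (cs.drop 5)).1
          || pvPix.isPrefixOf (pvSplit (cs.drop 5)).1) = true := by
        rcases Bool.or_eq_true_iff.mp hla with hI | hP
        · have hpre : pvIco <+: cs.drop 5 := List.isPrefixOf_iff_prefix.mp hI
          have htk := pvSplit_first_take (cs.drop 5) 5 (pvNoSep_ico _ hpre)
          have : pvIco <+: (pvSplit (cs.drop 5)).1 := by
            rw [List.prefix_iff_eq_take] at hpre ⊢
            rw [show pvIco.length = 5 from rfl] at hpre ⊢
            rw [htk]; exact hpre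
          simp [List.isPrefixOf_iff_prefix.mpr this]
        · have hpre : pvPix <+: cs.drop 5 := List.isPrefixOf_iff_prefix.mp hP
          have htk := pvSplit_first_take (cs.drop 5) 7 (pvNoSep_pix _ hpre)
          have : pvPix <+: (pvSplit (cs.drop 5)).1 := by
            rw [List.prefix_iff_eq_take] at hpre ⊢
            rw [show pvPix.length = 7 from rfl] at hpre ⊢
            rw [htk]; exact hpre
          simp [List.isPrefixOf_iff_prefix.mpr this]
      rw [hskip, ih]
      simp only [pvTailJoin, List.flatMap_cons, List.nil_append]
      rw [if_pos hfirst]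
      simp [List.append_assoc]
    · -- replaced by 'QtWidgets.'
      have hg : (pvSep.isPrefixOf (c :: cs)
          && !(pvIco.isPrefixOf (cs.drop 5) || pvPix.isPrefixOf (cs.drop 5))) = true := by
        simp only [Bool.and_eq_true, Bool.not_eq_true']
        exact ⟨hp, by simp only [Bool.not_eq_true] at hla; exact hla⟩
      rw [pvScan, if_pos hg]
      have hfirst : (pvIco.isPrefixOf (pvSplit (cs.drop 5)).1
          || pvPix.isPrefixOf (pvSplit (cs.drop 5)).1) = false := by
        rw [Bool.or_eq_false_iff]
        constructor <;> {
          rw [Bool.eq_false_iff]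
          intro hI
          apply hla
          have := (List.isPrefixOf_iff_prefix.mp hI).trans (pvSplit_first_prefix (cs.drop 5))
          simp [List.isPrefixOf_iff_prefix.mpr this]
        }
      rw [ih]
      simp only [pvTailJoin, List.flatMap_cons, List.nil_append]
      rw [if_neg (by rw [hfirst]; simp)]
      simp [List.append_assoc]
  | case3 c cs hp ih =>
    have hg : (pvSep.isPrefixOf (c :: cs)
        && !(pvIco.isPrefixOf (cs.drop 5) || pvPix.isPrefixOf (cs.drop 5))) = false := by
      simp [hp]
    rw [pvScan, if_neg (by rw [hg]; simp)]
    simp [ih]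

theorem pvIntercalate_nil (xs : List (List Char)) : List.intercalate [] xs = xs.flatten := by
  induction xs with
  | nil => simp [List.intercalate]
  | cons a t ih => cases t <;> simp_all [List.intercalate, List.intersperse]

theorem pvStarts (b : String) (p : String) (pl : List Char) (hp : p.toList = pl) :
    PySem.Str.startswith b p = pl.isPrefixOf b.toList := by
  rw [PySem.Str.startswith_eq, hp]
  by_cases h : pl <+: b.toList
  · rw [(PySem.Chars.startswith_iff _ _).mpr h, (List.isPrefixOf_iff_prefix.mpr h)]
  · rw [Bool.eq_false_iff.mpr (fun hc => h ((PySem.Chars.startswith_iff _ _).mp hc)),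
      Bool.eq_false_iff.mpr (fun hc => h (List.isPrefixOf_iff_prefix.mp hc))]

theorem pvLoopJoin (br : List String) :
    ((br.flatMap (fun b =>
        if PySem.Str.startswith b "QIcon" || PySem.Str.startswith b "QPixmap"
        then ["QtGui.", b] else ["QtWidgets.", b])).map String.toList).flatten
      = pvTailJoin (br.map String.toList) := by
  induction br with
  | nil => simp [pvTailJoin]
  | cons b br ih =>
    rw [List.flatMap_cons, List.map_append, List.flatten_append, ih]
    rw [pvStarts b "QIcon" pvIco rfl, pvStarts b "QPixmap" pvPix rfl]
    simp only [List.map_cons, pvTailJoin, List.flatMap_cons]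
    by_cases h : (pvIco.isPrefixOf b.toList || pvPix.isPrefixOf b.toList) = true
    · rw [if_pos h, if_pos h]
      simp [pvSep]
    · rw [if_neg h, if_neg h]
      simp [pvWid]

theorem pvTop (line : String) : replace_for_QtWidgets line = replace_for_QtWidgets_alt line := by
  have hmap := PySem.Str.split?_map line "QtGui."
  rw [show "QtGui.".toList = pvSep from rfl, PySem.Chars.split?] at hmap
  rw [if_neg (by simp [pvSep])] at hmap
  rw [pvSplitOn_eq] at hmap
  obtain ⟨bits, hbits, hmapbits⟩ := Option.map_eq_some_iff.mp hmap
  obtain ⟨b0, br, rfl, hb0, hbr⟩ := List.map_eq_cons_iff.mp hmapbits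
  rw [replace_for_QtWidgets, hbits]
  simp only [List.headD_cons]
  rw [show PySem.List.slice (b0 :: br) (some 1) none = br from by
    rw [PySem.List.slice_from (b0 :: br) (by norm_num : (0:Int) ≤ 1)]; rfl]
  rw [PySem.List.foldl_append_eq_flatMap]
  rw [replace_for_QtWidgets_alt, ← String.toList_inj]
  rw [PySem.Str.toList_join, String.toList_ofList]
  rw [PySem.Chars.join, pvIntercalate_nil]
  rw [pvMain]
  simp only [List.map_append, List.flatten_append, List.map_cons, List.map_nil,
    List.flatten_cons, List.flatten_nil]
  rw [pvLoopJoin, hb0, hbr]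
  simp

-- ===== VERDICT (by name: the statement is the Claim_ definition above) =====
theorem replace_for_QtWidgets_spec : Claim_equal_replace_for_QtWidgets := by
  intro line _
  exact pvTop line
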